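-- pv_equiv track=rewrite | github.com/shlapolosa/health-service-idp | microservices/accountant-anthropic/src/accountant.py | _prioritize_optimizations
-- ===== SOURCE A (Python) =====
-- from typing import Dict, List, Any, Optional, Tuple
--
-- def _prioritize_optimizations(optimizations: List[Dict[str, str]]) -> List[Dict[str, str]]:
--     """Prioritize optimization opportunities"""
--
--     priority_mapping = {
--         "Reserved Instances": "high",
--         "Auto-scaling": "high",
--         "DevOps Automation": "medium",
--         "Spot Instances": "medium",
--         "Storage Lifecycle": "medium",
--         "Team Efficiency": "low",
--         "Vendor Negotiations": "low"
--     }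
--
--     for optimization in optimizations:
--         opportunity = optimization.get("opportunity", "")
--         optimization["priority"] = priority_mapping.get(opportunity, "medium")
--
--     # Sort by priority (high, medium, low)
--     priority_order = {"high": 1, "medium": 2, "low": 3}
--     return sorted(optimizations, key=lambda x: priority_order.get(x.get("priority", "medium"), 2))
-- ===== SOURCE B (Python) =====
-- from typing import Dict, List, Any, Optional, Tuple
--
-- def _prioritize_optimizations(optimizations: List[Dict[str, str]]) -> List[Dict[str, str]]:
--     """Prioritize optimization opportunities (stable bucket partition instead of sorting)."""
--
--     priority_mapping = {
--         "Reserved Instances": "high",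
--         "Auto-scaling": "high",
--         "DevOps Automation": "medium",
--         "Spot Instances": "medium",
--         "Storage Lifecycle": "medium",
--         "Team Efficiency": "low",
--         "Vendor Negotiations": "low"
--     }
--
--     for optimization in optimizations:
--         opportunity = optimization.get("opportunity", "")
--         optimization["priority"] = priority_mapping.get(opportunity, "medium")
--
--     # One pass over three buckets; concatenation preserves the stable order.
--     high, medium, low = [], [], []
--     for optimization in optimizations:
--         p = optimization.get("priority", "")
--         if p == "high":
--             high.append(optimization)
--         elif p == "low":
--             low.append(optimization)
--         else:
--             medium.append(optimization)
--     return high + medium + low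
-- ===== Notes on version B (the rewrite author's own statement) =====
-- stated objective: alternative
-- what changed: The final sorted() by a 3-valued priority key is replaced by a single stable pass that partitions the stamped optimizations into high/medium/low buckets and returns their concatenation.
import Mathlib
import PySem

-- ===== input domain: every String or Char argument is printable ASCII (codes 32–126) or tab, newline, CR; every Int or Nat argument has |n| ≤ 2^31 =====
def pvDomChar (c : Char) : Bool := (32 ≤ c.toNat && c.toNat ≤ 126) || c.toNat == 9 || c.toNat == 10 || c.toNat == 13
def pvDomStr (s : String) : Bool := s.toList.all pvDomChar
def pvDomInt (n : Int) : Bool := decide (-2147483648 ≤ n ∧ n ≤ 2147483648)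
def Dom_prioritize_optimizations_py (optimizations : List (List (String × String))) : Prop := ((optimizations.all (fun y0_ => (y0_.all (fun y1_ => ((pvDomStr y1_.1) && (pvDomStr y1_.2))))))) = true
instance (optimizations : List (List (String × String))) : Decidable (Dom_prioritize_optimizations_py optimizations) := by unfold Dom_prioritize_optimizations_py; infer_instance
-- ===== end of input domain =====

-- B replaces A's final sorted() by a stable one-pass high/medium/low bucket partition (alternative
-- algorithm, same cost class in practice). Both Pythons mutate the input dicts in place identically
-- (stamping "priority"); the equivalence proved here is about the return value.

-- ===== PORT A =====
-- dict.get(k, dflt) on an inner dict (assoc list, unique keys in Python): first match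
def pvGetD (l : List (String × String)) (k dflt : String) : String :=
  match l with
  | [] => dflt
  | (k', v) :: t => if k' == k then v else pvGetD t k dflt

-- priority_order.get(s, 2) — Int-valued dict literal lookup, first match
def pvGetDInt (l : List (String × Int)) (k : String) (dflt : Int) : Int :=
  match l with
  | [] => dflt
  | (k', v) :: t => if k' == k then v else pvGetDInt t k dflt

def pvPriorityMapping : List (String × String) :=
  [("Reserved Instances", "high"), ("Auto-scaling", "high"), ("DevOps Automation", "medium"),
   ("Spot Instances", "medium"), ("Storage Lifecycle", "medium"), ("Team Efficiency", "low"),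
   ("Vendor Negotiations", "low")]

-- optimization["priority"] = v : overwrite in place if the key exists, else append (Python dict)
def pvSetItem (l : List (String × String)) (k v : String) : List (String × String) :=
  if l.any (fun p => p.1 == k) then l.map (fun p => if p.1 == k then (k, v) else p)
  else l ++ [(k, v)]

-- the body of A's (and B's) first loop, acting on one optimization
def pvStamp (d : List (String × String)) : List (String × String) :=
  pvSetItem d "priority" (pvGetD pvPriorityMapping (pvGetD d "opportunity" "") "medium")

def pvPriorityOrder : List (String × Int) := [("high", 1), ("medium", 2), ("low", 3)]

def prioritize_optimizations_py (optimizations : List (List (String × String))) : List (List (String × String)) :=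
  PySem.List.sorted (optimizations.map pvStamp)
    (fun x => pvGetDInt pvPriorityOrder (pvGetD x "priority" "medium") 2)

-- ===== PORT B =====
def pvBucketStep
    (acc : List (List (String × String)) × List (List (String × String)) × List (List (String × String)))
    (o : List (String × String)) :
    List (List (String × String)) × List (List (String × String)) × List (List (String × String)) :=
  if pvGetD o "priority" "" == "high" then (acc.1 ++ [o], acc.2.1, acc.2.2)
  else if pvGetD o "priority" "" == "low" then (acc.1, acc.2.1, acc.2.2 ++ [o])
  else (acc.1, acc.2.1 ++ [o], acc.2.2)

-- return high + medium + low
def pvJoinBuckets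
    (b : List (List (String × String)) × List (List (String × String)) × List (List (String × String))) :
    List (List (String × String)) :=
  b.1 ++ b.2.1 ++ b.2.2

def prioritize_optimizations_py_alt (optimizations : List (List (String × String))) : List (List (String × String)) :=
  pvJoinBuckets ((optimizations.map pvStamp).foldl pvBucketStep ([], [], []))

-- ===== PRECONDITION & SPEC =====
def Spec_prioritize_optimizations_py (optimizations : List (List (String × String))) (out : List (List (String × String))) : Prop := out = prioritize_optimizations_py_alt optimizations
instance (optimizations : List (List (String × String))) (out : List (List (String × String))) : Decidable (Spec_prioritize_optimizations_py optimizations out) := by unfold Spec_prioritize_optimizations_py; infer_instance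

-- ===== CLAIM (what is proved, stated in full; the proofs are below) =====
def Claim_equal_prioritize_optimizations_py : Prop := ∀ (optimizations : List (List (String × String))), Dom_prioritize_optimizations_py optimizations → Spec_prioritize_optimizations_py optimizations (prioritize_optimizations_py optimizations)

-- ===== LEMMAS AND PROOFS =====

-- the priority a stamped optimization carries
def pvPrio (d : List (String × String)) : String :=
  pvGetD pvPriorityMapping (pvGetD d "opportunity" "") "medium"

-- A's sort key, on a stamped element
def pvKey (x : List (String × String)) : Int :=
  pvGetDInt pvPriorityOrder (pvGetD x "priority" "medium") 2

theorem pvPrio_cases (d : List (String × String)) :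
    pvPrio d = "high" ∨ pvPrio d = "medium" ∨ pvPrio d = "low" := by
  unfold pvPrio pvPriorityMapping
  simp only [pvGetD]
  split_ifs <;> simp

theorem getD_map_set (l : List (String × String)) (k v dflt : String)
    (h : l.any (fun p => p.1 == k) = true) :
    pvGetD (l.map (fun p => if p.1 == k then (k, v) else p)) k dflt = v := by
  induction l with
  | nil => simp at h
  | cons p t ih =>
    by_cases hp : p.1 = k
    · simp [pvGetD, hp]
    · have hp' : (p.1 == k) = false := by simp [hp]
      simp only [List.any_cons, hp', Bool.false_or] at h
      simpa [pvGetD, hp] using ih h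

theorem getD_append_not_mem (l : List (String × String)) (k v dflt : String)
    (h : l.any (fun p => p.1 == k) = false) :
    pvGetD (l ++ [(k, v)]) k dflt = v := by
  induction l with
  | nil => simp [pvGetD]
  | cons p t ih =>
    simp only [List.any_cons, Bool.or_eq_false_iff] at h
    simp [pvGetD, h.1, ih h.2]

theorem getD_setItem_self (l : List (String × String)) (k v dflt : String) :
    pvGetD (pvSetItem l k v) k dflt = v := by
  unfold pvSetItem
  by_cases h : l.any (fun p => p.1 == k)
  · simp only [h, if_true]; exact getD_map_set l k v dflt h
  · simp only [Bool.not_eq_true] at h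
    simp only [h, Bool.false_eq_true, if_false]
    exact getD_append_not_mem l k v dflt h

theorem getD_stamp (d : List (String × String)) (dflt : String) :
    pvGetD (pvStamp d) "priority" dflt = pvPrio d :=
  getD_setItem_self d "priority" (pvPrio d) dflt

theorem key_stamp (d : List (String × String)) :
    pvKey (pvStamp d) = pvGetDInt pvPriorityOrder (pvPrio d) 2 := by
  unfold pvKey; rw [getD_stamp]

theorem key_stamp_cases (d : List (String × String)) :
    (pvPrio d = "high" ∧ pvKey (pvStamp d) = 1) ∨
    (pvPrio d = "medium" ∧ pvKey (pvStamp d) = 2) ∨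
    (pvPrio d = "low" ∧ pvKey (pvStamp d) = 3) := by
  rcases pvPrio_cases d with h | h | h <;>
    simp [key_stamp, h, pvPriorityOrder, pvGetDInt]

-- insertBy facts
theorem insertBy_cons_pos {α : Type} (b : α → α → Bool) (x y : α) (t : List α) (h : b x y = true) :
    PySem.List.insertBy b x (y :: t) = x :: y :: t := by
  simp [PySem.List.insertBy, h]

theorem insertBy_cons_neg {α : Type} (b : α → α → Bool) (x y : α) (t : List α) (h : b x y = false) :
    PySem.List.insertBy b x (y :: t) = y :: PySem.List.insertBy b x t := by
  simp [PySem.List.insertBy, h]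

theorem insertBy_skip {α : Type} (b : α → α → Bool) (x : α) (A rest : List α)
    (h : ∀ a ∈ A, b x a = false) :
    PySem.List.insertBy b x (A ++ rest) = A ++ PySem.List.insertBy b x rest := by
  induction A with
  | nil => simp
  | cons a t ih =>
    rw [List.cons_append, insertBy_cons_neg b x a _ (h a (by simp)), ih (fun a ha => h a (by simp [ha]))]
    simp

theorem insertBy_stop {α : Type} (b : α → α → Bool) (x : α) (rest : List α)
    (h : ∀ y ∈ rest, b x y = true) :
    PySem.List.insertBy b x rest = x :: rest := by
  cases rest with
  | nil => rfl
  | cons y t => exact insertBy_cons_pos b x y t (h y (by simp))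

theorem insertBy_all_false {α : Type} (b : α → α → Bool) (x : α) (L : List α)
    (h : ∀ y ∈ L, b x y = false) :
    PySem.List.insertBy b x L = L ++ [x] := by
  induction L with
  | nil => rfl
  | cons y t ih =>
    rw [insertBy_cons_neg b x y t (h y (by simp)), ih (fun a ha => h a (by simp [ha]))]
    simp

-- the stable insertion sort over keys in {1,2,3} builds exactly the three buckets
theorem foldl_ins_blocks (xs : List (List (String × String)))
    (hxs : ∀ x ∈ xs, pvKey x = 1 ∨ pvKey x = 2 ∨ pvKey x = 3) :
    ∀ A B C : List (List (String × String)),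
      (∀ a ∈ A, pvKey a = 1) → (∀ b ∈ B, pvKey b = 2) → (∀ c ∈ C, pvKey c = 3) →
      xs.foldl (fun acc x => PySem.List.insertBy (fun a b => decide (pvKey a < pvKey b)) x acc) (A ++ (B ++ C)) =
        (A ++ xs.filter (fun x => pvKey x == 1)) ++
        ((B ++ xs.filter (fun x => pvKey x == 2)) ++ (C ++ xs.filter (fun x => pvKey x == 3))) := by
  induction xs with
  | nil => intro A B C _ _ _; simp
  | cons x t ih =>
    intro A B C hA hB hC
    have ht : ∀ y ∈ t, pvKey y = 1 ∨ pvKey y = 2 ∨ pvKey y = 3 := fun y hy => hxs y (by simp [hy])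
    rcases hxs x (by simp) with hx | hx | hx
    · -- key 1: skip A, insert before B ++ C
      have hstep : PySem.List.insertBy (fun a b => decide (pvKey a < pvKey b)) x (A ++ (B ++ C)) =
          (A ++ [x]) ++ (B ++ C) := by
        rw [insertBy_skip _ x A (B ++ C) (fun a ha => by simp [hx, hA a ha]),
            insertBy_stop _ x (B ++ C) ?_]
        · simp
        · intro y hy
          rcases List.mem_append.mp hy with h' | h'
          · simp [hx, hB y h']
          · simp [hx, hC y h']
      rw [List.foldl_cons, hstep, ih ht (A ++ [x]) B C ?_ hB hC]
      · simp [hx]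
      · intro a ha; rcases List.mem_append.mp ha with h' | h'
        · exact hA a h'
        · simp at h'; simp [h', hx]
    · -- key 2: skip A ++ B, insert before C
      have hstep : PySem.List.insertBy (fun a b => decide (pvKey a < pvKey b)) x (A ++ (B ++ C)) =
          A ++ ((B ++ [x]) ++ C) := by
        rw [← List.append_assoc,
            insertBy_skip _ x (A ++ B) C ?_, insertBy_stop _ x C (fun c hc => by simp [hx, hC c hc])]
        · simp
        · intro a ha; rcases List.mem_append.mp ha with h' | h'
          · simp [hx, hA a h']
          · simp [hx, hB a h']
      rw [List.foldl_cons, hstep, ih ht A (B ++ [x]) C hA ?_ hC]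
      · simp [hx]
      · intro b hb; rcases List.mem_append.mp hb with h' | h'
        · exact hB b h'
        · simp at h'; simp [h', hx]
    · -- key 3: skip everything, append at the end
      have hstep : PySem.List.insertBy (fun a b => decide (pvKey a < pvKey b)) x (A ++ (B ++ C)) =
          A ++ (B ++ (C ++ [x])) := by
        rw [insertBy_skip _ x A (B ++ C) (fun a ha => by simp [hx, hA a ha]),
            insertBy_skip _ x B C (fun a ha => by simp [hx, hB a ha]),
            insertBy_all_false _ x C (fun a ha => by simp [hx, hC a ha])]
      rw [List.foldl_cons, hstep, ih ht A B (C ++ [x]) hA hB ?_]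
      · simp [hx]
      · intro c hc; rcases List.mem_append.mp hc with h' | h'
        · exact hC c h'
        · simp at h'; simp [h', hx]

-- A = the three key-filters concatenated
theorem portA_eq_filters (opts : List (List (String × String))) :
    prioritize_optimizations_py opts =
      ((opts.map pvStamp).filter (fun x => pvKey x == 1)) ++
      (((opts.map pvStamp).filter (fun x => pvKey x == 2)) ++
       ((opts.map pvStamp).filter (fun x => pvKey x == 3))) := by
  unfold prioritize_optimizations_py
  have hk : ∀ x ∈ opts.map pvStamp, pvKey x = 1 ∨ pvKey x = 2 ∨ pvKey x = 3 := by
    intro x hx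
    rcases List.mem_map.mp hx with ⟨d, _, rfl⟩
    rcases key_stamp_cases d with ⟨_, h⟩ | ⟨_, h⟩ | ⟨_, h⟩ <;> simp [h]
  have := foldl_ins_blocks (opts.map pvStamp) hk [] [] [] (by simp) (by simp) (by simp)
  simp only [List.nil_append] at this
  calc PySem.List.sorted (opts.map pvStamp) (fun x => pvGetDInt pvPriorityOrder (pvGetD x "priority" "medium") 2)
      = PySem.List.sorted (opts.map pvStamp) pvKey := rfl
    _ = _ := by rw [PySem.List.sorted_eq_foldl_insertBy, this]

-- B's bucket fold = the three string-filters concatenated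
theorem foldl_buckets (xs : List (List (String × String))) :
    ∀ h m l : List (List (String × String)),
      xs.foldl pvBucketStep (h, m, l) =
      (h ++ xs.filter (fun o => pvGetD o "priority" "" == "high"),
       m ++ xs.filter (fun o => !(pvGetD o "priority" "" == "high") && !(pvGetD o "priority" "" == "low")),
       l ++ xs.filter (fun o => pvGetD o "priority" "" == "low")) := by
  induction xs with
  | nil => intro h m l; simp
  | cons x t ih =>
    intro h m l
    simp only [List.foldl_cons, List.filter_cons]
    by_cases h1 : pvGetD x "priority" "" = "high"
    · simp [pvBucketStep, h1, ih]
    · by_cases h3 : pvGetD x "priority" "" = "low"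
      · simp [pvBucketStep, h3, ih]
      · simp [pvBucketStep, h1, h3, ih]

-- on stamped elements, B's string tests coincide with A's key tests
theorem stamped_pred_high (d : List (String × String)) :
    (pvGetD (pvStamp d) "priority" "" == "high") = (pvKey (pvStamp d) == 1) := by
  rw [getD_stamp]
  rcases key_stamp_cases d with ⟨h, hk⟩ | ⟨h, hk⟩ | ⟨h, hk⟩ <;> simp [h, hk]

theorem stamped_pred_low (d : List (String × String)) :
    (pvGetD (pvStamp d) "priority" "" == "low") = (pvKey (pvStamp d) == 3) := by
  rw [getD_stamp]
  rcases key_stamp_cases d with ⟨h, hk⟩ | ⟨h, hk⟩ | ⟨h, hk⟩ <;> simp [h, hk]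

theorem stamped_pred_med (d : List (String × String)) :
    (!(pvGetD (pvStamp d) "priority" "" == "high") && !(pvGetD (pvStamp d) "priority" "" == "low"))
      = (pvKey (pvStamp d) == 2) := by
  rw [getD_stamp]
  rcases key_stamp_cases d with ⟨h, hk⟩ | ⟨h, hk⟩ | ⟨h, hk⟩ <;> simp [h, hk]

theorem portB_eq_filters (opts : List (List (String × String))) :
    prioritize_optimizations_py_alt opts =
      ((opts.map pvStamp).filter (fun x => pvKey x == 1)) ++
      (((opts.map pvStamp).filter (fun x => pvKey x == 2)) ++
       ((opts.map pvStamp).filter (fun x => pvKey x == 3))) := by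
  have e1 : (opts.map pvStamp).filter (fun o => pvGetD o "priority" "" == "high") =
      (opts.map pvStamp).filter (fun x => pvKey x == 1) :=
    List.filter_congr (fun x hx => by
      rcases List.mem_map.mp hx with ⟨d, _, rfl⟩; exact stamped_pred_high d)
  have e2 : (opts.map pvStamp).filter
        (fun o => !(pvGetD o "priority" "" == "high") && !(pvGetD o "priority" "" == "low")) =
      (opts.map pvStamp).filter (fun x => pvKey x == 2) :=
    List.filter_congr (fun x hx => by
      rcases List.mem_map.mp hx with ⟨d, _, rfl⟩; exact stamped_pred_med d)
  have e3 : (opts.map pvStamp).filter (fun o => pvGetD o "priority" "" == "low") =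
      (opts.map pvStamp).filter (fun x => pvKey x == 3) :=
    List.filter_congr (fun x hx => by
      rcases List.mem_map.mp hx with ⟨d, _, rfl⟩; exact stamped_pred_low d)
  unfold prioritize_optimizations_py_alt pvJoinBuckets
  rw [foldl_buckets (opts.map pvStamp) [] [] [], e1, e2, e3]
  simp

-- ===== VERDICT (by name: the statement is the Claim_ definition above) =====
theorem prioritize_optimizations_py_spec : Claim_equal_prioritize_optimizations_py := by
  intro opts _
  unfold Spec_prioritize_optimizations_py
  rw [portA_eq_filters, portB_eq_filters]
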